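-- pv_equiv track=rewrite | github.com/jfox85/adnihilator | adnihilator/sponsors.py | _generate_word_boundary_splits
-- ===== SOURCE A (Python) =====
-- COMMON_WORD_PARTS = {
--     'bit': True, 'warden': True,  # Bitwarden -> bit warden
--     'cache': True, 'fly': True,   # CacheFly -> cache fly
--     'out': True, 'systems': True, # OutSystems -> out systems
--     'space': True, 'ship': True,  # Spaceship -> space ship
--     'mail': True,                 # SpaceMail -> space mail
--     'express': True, 'vpn': True, # ExpressVPN -> express vpn
--     'zip': True, 'recruiter': True,  # ZipRecruiter -> zip recruiter
--     'hello': True, 'fresh': True, # HelloFresh -> hello fresh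
--     'square': True,               # Squarespace -> square space
--     'better': True, 'help': True, # BetterHelp -> better help
--     'nord': True, 'pass': True,   # NordPass -> nord pass, NordVPN -> nord vpn
--     'surf': True, 'shark': True,  # Surfshark -> surf shark
--     'rocket': True, 'money': True,  # Rocket Money
--     'aura': True, 'frames': True,  # Aura Frames
-- }
--
-- def _generate_word_boundary_splits(name: str) -> set[str]:
--     """Generate word boundary split variations for a name.
--
--     Uses a dictionary of common word parts to split compound names
--     that Whisper might transcribe as separate words.
--
--     Args:
--         name: The sponsor name to split.
--
--     Returns:
--         Set of split variations (lowercase).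
--     """
--     variants: set[str] = set()
--     name_lower = name.lower()
--
--     # Try splitting at each position
--     for i in range(2, len(name_lower) - 1):
--         left = name_lower[:i]
--         right = name_lower[i:]
--
--         # Check if both parts are known word parts
--         if left in COMMON_WORD_PARTS and right in COMMON_WORD_PARTS:
--             variants.add(f"{left} {right}")
--
--         # Also check if just the split makes sense without dictionary
--         # (for longer names that might have internal word boundaries)
--
--     # Also try matching common prefixes/suffixes
--     for word in COMMON_WORD_PARTS:
--         if name_lower.startswith(word) and len(name_lower) > len(word):
--             rest = name_lower[len(word):]
--             if rest and rest[0].isalpha():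
--                 variants.add(f"{word} {rest}")
--         if name_lower.endswith(word) and len(name_lower) > len(word):
--             prefix = name_lower[:-len(word)]
--             if prefix and prefix[-1].isalpha():
--                 variants.add(f"{prefix} {word}")
--
--     return variants
-- ===== SOURCE B (Python) =====
-- COMMON_WORD_PARTS = {
--     'bit': True, 'warden': True,
--     'cache': True, 'fly': True,
--     'out': True, 'systems': True,
--     'space': True, 'ship': True,
--     'mail': True,
--     'express': True, 'vpn': True,
--     'zip': True, 'recruiter': True,
--     'hello': True, 'fresh': True,
--     'square': True,
--     'better': True, 'help': True,
--     'nord': True, 'pass': True,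
--     'surf': True, 'shark': True,
--     'rocket': True, 'money': True,
--     'aura': True, 'frames': True,
-- }
--
--
-- def _word_candidates(nl: str, w: str) -> list[str]:
--     """Prefix/suffix split candidates of nl contributed by the single word w."""
--     out: list[str] = []
--     if nl.startswith(w) and len(nl) > len(w):
--         rest = nl[len(w):]
--         if rest and rest[0].isalpha():
--             out.append(f"{w} {rest}")
--     if nl.endswith(w) and len(nl) > len(w):
--         prefix = nl[:-len(w)]
--         if prefix and prefix[-1].isalpha():
--             out.append(f"{prefix} {w}")
--     return out
--
--
-- def _generate_word_boundary_splits(name: str) -> set[str]: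
--     """Generate word boundary split variations for a name (dictionary-driven).
--
--     Instead of scanning every split position, walk the dictionary: a
--     both-halves-in-dictionary split exists exactly for the words that
--     prefix the name with the remainder also a known word (every
--     dictionary word has length >= 3, so a naive scan's positional
--     bounds 2 <= i <= len-2 are automatic).  The prefix/suffix variants
--     are generated per word as small candidate lists and everything is
--     collected into a set in one go.
--     """
--     nl = name.lower()
--     splits = [f"{w} {nl[len(w):]}" for w in COMMON_WORD_PARTS
--               if nl.startswith(w) and nl[len(w):] in COMMON_WORD_PARTS]
--     cands = [c for w in COMMON_WORD_PARTS for c in _word_candidates(nl, w)]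
--     return set(splits + cands)
-- ===== Notes on version B (the rewrite author's own statement) =====
-- stated objective: faster
-- what changed: A's imperative positional scan (slice the name at every index and probe the dictionary twice per index) plus a second imperative set-accumulating loop is replaced by a declarative dictionary-driven construction: a comprehension of both-halves splits over the words prefixing the name (valid because every dictionary word has length >= 3, so the scan's positional bounds are automatic), a per-word candidate-list generator for prefix/suffix variants, and one final set() over the concatenated candidates.
import Mathlib
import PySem

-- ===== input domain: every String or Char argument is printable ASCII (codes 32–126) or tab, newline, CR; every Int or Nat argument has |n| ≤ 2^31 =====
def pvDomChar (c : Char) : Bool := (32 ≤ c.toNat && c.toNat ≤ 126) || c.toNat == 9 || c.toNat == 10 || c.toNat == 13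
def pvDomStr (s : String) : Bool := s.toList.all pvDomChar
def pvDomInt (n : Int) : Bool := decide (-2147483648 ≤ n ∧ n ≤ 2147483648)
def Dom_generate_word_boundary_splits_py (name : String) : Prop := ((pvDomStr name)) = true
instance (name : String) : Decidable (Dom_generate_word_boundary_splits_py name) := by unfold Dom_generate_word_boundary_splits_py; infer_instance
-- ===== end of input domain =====

-- B replaces A's quadratic positional split scan and imperative set-accumulating loops by a
-- declarative dictionary-driven construction (filter/map + per-word candidate lists + one set());
-- the per-word pass avoids the quadratic positional slicing scan.

-- ===== PORT A =====
-- COMMON_WORD_PARTS: all values are True and never read; `x in COMMON_WORD_PARTS` is key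
-- membership and `for word in COMMON_WORD_PARTS` iterates the keys in insertion order, so the
-- dict is ported as its key list (keys are distinct).
def pvWords : List (List Char) :=
  ["bit".toList, "warden".toList, "cache".toList, "fly".toList, "out".toList, "systems".toList,
   "space".toList, "ship".toList, "mail".toList, "express".toList, "vpn".toList, "zip".toList,
   "recruiter".toList, "hello".toList, "fresh".toList, "square".toList, "better".toList,
   "help".toList, "nord".toList, "pass".toList, "surf".toList, "shark".toList, "rocket".toList,
   "money".toList, "aura".toList, "frames".toList]

def generate_word_boundary_splits_py (name : String) : List String :=
  let nl := PySem.Chars.lower name.toList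
  -- for i in range(2, len(name_lower) - 1): split at position i
  let variants : PySem.Set String :=
    (PySem.List.pyRange 2 ((nl.length : Int) - 1)).foldl (fun v i =>
      let left := PySem.List.slice nl none (some i)
      let right := PySem.List.slice nl (some i) none
      if pvWords.contains left && pvWords.contains right then
        PySem.Set.add v (String.ofList (left ++ ' ' :: right))
      else v) PySem.Set.empty
  -- for word in COMMON_WORD_PARTS: prefix / suffix matches
  pvWords.foldl (fun v word =>
    let v :=
      if PySem.Chars.startswith nl word && decide (word.length < nl.length) then
        let rest := PySem.List.slice nl (some (word.length : Int)) none
        if !rest.isEmpty && (PySem.List.pyGet? rest 0).elim false PySem.Chars.isalpha then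
          PySem.Set.add v (String.ofList (word ++ ' ' :: rest))
        else v
      else v
    if PySem.Chars.endswith nl word && decide (word.length < nl.length) then
      let pre := PySem.List.slice nl none (some (-(word.length : Int)))
      if !pre.isEmpty && (PySem.List.pyGet? pre (-1)).elim false PySem.Chars.isalpha then
        PySem.Set.add v (String.ofList (pre ++ ' ' :: word))
      else v
    else v) variants

-- ===== PORT B =====
-- _word_candidates(nl, w): the 0–2 prefix/suffix variants contributed by one word
def pvCand (nl w : List Char) : List String :=
  (if PySem.Chars.startswith nl w && decide (w.length < nl.length) then
     let rest := PySem.List.slice nl (some (w.length : Int)) none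
     if !rest.isEmpty && (PySem.List.pyGet? rest 0).elim false PySem.Chars.isalpha then
       [String.ofList (w ++ ' ' :: rest)]
     else []
   else []) ++
  (if PySem.Chars.endswith nl w && decide (w.length < nl.length) then
     let pre := PySem.List.slice nl none (some (-(w.length : Int)))
     if !pre.isEmpty && (PySem.List.pyGet? pre (-1)).elim false PySem.Chars.isalpha then
       [String.ofList (pre ++ ' ' :: w)]
     else []
   else [])

def generate_word_boundary_splits_py_alt (name : String) : List String :=
  let nl := PySem.Chars.lower name.toList
  -- comprehension: both-halves-in-dictionary splits, driven by the dictionary words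
  let splits :=
    (pvWords.filter (fun w =>
        PySem.Chars.startswith nl w &&
        pvWords.contains (PySem.List.slice nl (some (w.length : Int)) none))).map
      (fun w => String.ofList (w ++ ' ' :: PySem.List.slice nl (some (w.length : Int)) none))
  -- comprehension: per-word prefix/suffix candidates; then one set() over everything
  PySem.Set.ofList (splits ++ pvWords.flatMap (pvCand nl))

-- ===== PRECONDITION & SPEC =====
def Spec_generate_word_boundary_splits_py (name : String) (out : List String) : Prop := out = generate_word_boundary_splits_py_alt name
instance (name : String) (out : List String) : Decidable (Spec_generate_word_boundary_splits_py name out) := by unfold Spec_generate_word_boundary_splits_py; infer_instance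

-- ===== CLAIM (what is proved, stated in full; the proofs are below) =====
def Claim_equal_generate_word_boundary_splits_py : Prop := ∀ (name : String), Dom_generate_word_boundary_splits_py name → Spec_generate_word_boundary_splits_py name (generate_word_boundary_splits_py name)

-- ===== LEMMAS AND PROOFS =====

-- every dictionary word has length ≥ 3
theorem pvWords_len : ∀ w ∈ pvWords, 3 ≤ w.length := by decide

-- no dictionary word is a proper prefix of another
theorem pvWords_prefix_free : ∀ w1 ∈ pvWords, ∀ w2 ∈ pvWords, w1 <+: w2 → w1 = w2 := by decide

-- a string has at most one decomposition into two dictionary words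
theorem pv_uniq {nl l1 r1 l2 r2 : List Char}
    (h1 : l1 ∈ pvWords) (h2 : l2 ∈ pvWords)
    (e1 : l1 ++ r1 = nl) (e2 : l2 ++ r2 = nl) : l1 = l2 ∧ r1 = r2 := by
  have p1 : l1 <+: nl := ⟨r1, e1⟩
  have p2 : l2 <+: nl := ⟨r2, e2⟩
  have : l1 = l2 := by
    rcases List.prefix_or_prefix_of_prefix p1 p2 with h | h
    · exact pvWords_prefix_free l1 h1 l2 h2 h
    · exact (pvWords_prefix_free l2 h2 l1 h1 h).symm
  subst this
  exact ⟨rfl, List.append_cancel_left (e1.trans e2.symm)⟩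

def pvPA (nl : List Char) (i : Int) : Bool :=
  pvWords.contains (PySem.List.slice nl none (some i)) &&
  pvWords.contains (PySem.List.slice nl (some i) none)

def pvGA (nl : List Char) (i : Int) : String :=
  String.ofList (PySem.List.slice nl none (some i) ++ ' ' :: PySem.List.slice nl (some i) none)

def pvPB (nl : List Char) (w : List Char) : Bool :=
  PySem.Chars.startswith nl w && pvWords.contains (PySem.List.slice nl (some (w.length : Int)) none)

def pvGB (nl : List Char) (w : List Char) : String :=
  String.ofList (w ++ ' ' :: PySem.List.slice nl (some (w.length : Int)) none)

-- a valid decomposition of nl into two dictionary words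
def pvValid (nl l r : List Char) : Prop := l ∈ pvWords ∧ r ∈ pvWords ∧ l ++ r = nl

theorem pv_add_const {α : Type} [BEq α] [LawfulBEq α] (x : α) :
    ∀ (t : List α), (∀ y ∈ t, y = x) → t.foldl PySem.Set.add [x] = [x] := by
  intro t
  induction t with
  | nil => intro _; rfl
  | cons a t ih =>
    intro h
    have ha : a = x := h a (by simp)
    subst ha
    have : PySem.Set.add [a] a = [a] := by simp [PySem.Set.add]
    simpa [List.foldl_cons, this] using ih (fun y hy => h y (by simp [hy]))

theorem pv_ofList_const {α : Type} [BEq α] [LawfulBEq α] (x : α) :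
    ∀ (m : List α), (∀ y ∈ m, y = x) → PySem.Set.ofList m = if m = [] then [] else [x] := by
  intro m hm
  cases m with
  | nil => rfl
  | cons a t =>
    have ha : a = x := hm a (by simp)
    subst ha
    rw [PySem.Set.ofList_eq_foldl]
    have hadd : PySem.Set.add [] a = [a] := by simp [PySem.Set.add]
    simp only [List.foldl_cons, hadd, if_neg (List.cons_ne_nil a t)]
    exact pv_add_const a t (fun y hy => hm y (by simp [hy]))

-- loop 1 of A as an ofList
theorem pvA1_eq (nl : List Char) :
    ((PySem.List.pyRange 2 ((nl.length : Int) - 1)).foldl (fun v i =>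
      let left := PySem.List.slice nl none (some i)
      let right := PySem.List.slice nl (some i) none
      if pvWords.contains left && pvWords.contains right then
        PySem.Set.add v (String.ofList (left ++ ' ' :: right))
      else v) PySem.Set.empty)
    = PySem.Set.ofList
        (((PySem.List.pyRange 2 ((nl.length : Int) - 1)).filter (pvPA nl)).map (pvGA nl)) := by
  have h : (fun (v : PySem.Set String) (i : Int) =>
      let left := PySem.List.slice nl none (some i)
      let right := PySem.List.slice nl (some i) none
      if pvWords.contains left && pvWords.contains right then
        PySem.Set.add v (String.ofList (left ++ ' ' :: right))
      else v)
      = (fun (v : PySem.Set String) (i : Int) =>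
          if pvPA nl i = true then PySem.Set.add v (pvGA nl i) else v) := by
    funext v i; simp only [pvPA, pvGA]
  rw [h, PySem.List.foldl_if_eq_foldl_filter, PySem.Set.ofList_eq_foldl, List.foldl_map]
  rfl

-- every element A's loop 1 produces comes from a valid decomposition
theorem pvA_mem {nl : List Char} {s : String}
    (hs : s ∈ ((PySem.List.pyRange 2 ((nl.length : Int) - 1)).filter (pvPA nl)).map (pvGA nl)) :
    ∃ l r, pvValid nl l r ∧ s = String.ofList (l ++ ' ' :: r) := by
  obtain ⟨i, hi, rfl⟩ := List.mem_map.mp hs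
  obtain ⟨hir, hip⟩ := List.mem_filter.mp hi
  obtain ⟨hi2, _⟩ := PySem.List.mem_pyRange_one.mp hir
  have h0 : (0 : Int) ≤ i := by omega
  obtain ⟨hl, hr⟩ := Bool.and_eq_true _ _ |>.mp hip
  rw [PySem.List.slice_to nl h0] at hl
  rw [PySem.List.slice_from nl h0] at hr
  refine ⟨nl.take i.toNat, nl.drop i.toNat,
    ⟨List.mem_of_elem_eq_true hl, List.mem_of_elem_eq_true hr, List.take_append_drop _ _⟩, ?_⟩
  simp [pvGA, PySem.List.slice_to nl h0, PySem.List.slice_from nl h0]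

theorem pvB_mem {nl : List Char} {s : String}
    (hs : s ∈ (pvWords.filter (pvPB nl)).map (pvGB nl)) :
    ∃ l r, pvValid nl l r ∧ s = String.ofList (l ++ ' ' :: r) := by
  obtain ⟨w, hw, rfl⟩ := List.mem_map.mp hs
  obtain ⟨hwm, hwp⟩ := List.mem_filter.mp hw
  obtain ⟨hst, hr⟩ := Bool.and_eq_true _ _ |>.mp hwp
  have h0 : (0 : Int) ≤ (w.length : Int) := by positivity
  rw [PySem.List.slice_from nl h0] at hr
  obtain ⟨t, ht⟩ := (PySem.Chars.startswith_iff nl w).mp hst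
  have hdrop : nl.drop (w.length : Int).toNat = t := by
    rw [Int.toNat_natCast, ← ht, List.drop_left]
  refine ⟨w, nl.drop (w.length : Int).toNat,
    ⟨hwm, by rw [hdrop] at hr ⊢; exact List.mem_of_elem_eq_true hr, by rw [hdrop, ht]⟩, ?_⟩
  simp [pvGB, PySem.List.slice_from nl h0]

-- a valid decomposition makes both split generators fire
theorem pvA_nonempty {nl l r : List Char} (h : pvValid nl l r) :
    ((PySem.List.pyRange 2 ((nl.length : Int) - 1)).filter (pvPA nl)).map (pvGA nl) ≠ [] := by
  obtain ⟨hl, hr, he⟩ := h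
  have hll := pvWords_len l hl
  have hrl := pvWords_len r hr
  have hlen : nl.length = l.length + r.length := by rw [← he]; simp
  intro hmap
  rw [List.map_eq_nil_iff, List.filter_eq_nil_iff] at hmap
  apply hmap (l.length : Int)
  · exact PySem.List.mem_pyRange_one.mpr (by omega)
  · have h0 : (0 : Int) ≤ (l.length : Int) := by positivity
    unfold pvPA
    rw [PySem.List.slice_to nl h0, PySem.List.slice_from nl h0, Int.toNat_natCast, ← he,
      List.take_left, List.drop_left]
    simp [hl, hr]

theorem pvB_nonempty {nl l r : List Char} (h : pvValid nl l r) :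
    (pvWords.filter (pvPB nl)).map (pvGB nl) ≠ [] := by
  obtain ⟨hl, hr, he⟩ := h
  intro hmap
  rw [List.map_eq_nil_iff, List.filter_eq_nil_iff] at hmap
  apply hmap l hl
  have h0 : (0 : Int) ≤ (l.length : Int) := by positivity
  unfold pvPB
  rw [PySem.List.slice_from nl h0, Int.toNat_natCast, ← he, List.drop_left]
  simp [hr, (PySem.Chars.startswith_iff (l ++ r) l).mpr ⟨r, rfl⟩]

-- the two split lists build the same set
theorem pv_splits_eq (nl : List Char) :
    PySem.Set.ofList (((PySem.List.pyRange 2 ((nl.length : Int) - 1)).filter (pvPA nl)).map (pvGA nl))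
    = PySem.Set.ofList ((pvWords.filter (pvPB nl)).map (pvGB nl)) := by
  by_cases hv : ∃ l r, pvValid nl l r
  · obtain ⟨l, r, hval⟩ := hv
    have key : ∀ s ∈ ((PySem.List.pyRange 2 ((nl.length : Int) - 1)).filter (pvPA nl)).map (pvGA nl)
        ++ (pvWords.filter (pvPB nl)).map (pvGB nl), s = String.ofList (l ++ ' ' :: r) := by
      intro s hs
      rcases List.mem_append.mp hs with hs | hs
      · obtain ⟨l', r', ⟨hl', hr', he'⟩, rfl⟩ := pvA_mem hs
        obtain ⟨e1, e2⟩ := pv_uniq hl' hval.1 he' hval.2.2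
        rw [e1, e2]
      · obtain ⟨l', r', ⟨hl', hr', he'⟩, rfl⟩ := pvB_mem hs
        obtain ⟨e1, e2⟩ := pv_uniq hl' hval.1 he' hval.2.2
        rw [e1, e2]
    rw [pv_ofList_const _ _ (fun y hy => key y (List.mem_append.mpr (Or.inl hy))),
      pv_ofList_const _ _ (fun y hy => key y (List.mem_append.mpr (Or.inr hy))),
      if_neg (pvA_nonempty hval), if_neg (pvB_nonempty hval)]
  · have h1 : ((PySem.List.pyRange 2 ((nl.length : Int) - 1)).filter (pvPA nl)).map (pvGA nl) = [] := by
      by_contra hne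
      obtain ⟨s, hs⟩ := List.exists_mem_of_ne_nil _ hne
      obtain ⟨l, r, hval, _⟩ := pvA_mem hs
      exact hv ⟨l, r, hval⟩
    have h2 : (pvWords.filter (pvPB nl)).map (pvGB nl) = [] := by
      by_contra hne
      obtain ⟨s, hs⟩ := List.exists_mem_of_ne_nil _ hne
      obtain ⟨l, r, hval, _⟩ := pvB_mem hs
      exact hv ⟨l, r, hval⟩
    rw [h1, h2]

-- set() over a concatenation = insert the tail into the set of the head
theorem pv_ofList_append {α : Type} [BEq α] [LawfulBEq α] (l l' : List α) :
    PySem.Set.ofList (l ++ l') = l'.foldl PySem.Set.add (PySem.Set.ofList l) := by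
  rw [PySem.Set.ofList_eq_foldl, PySem.Set.ofList_eq_foldl, List.foldl_append]

-- one step of A's loop 2 = inserting that word's candidate list
theorem pv_step_eq (nl w : List Char) (v : PySem.Set String) :
    (let v' :=
      if PySem.Chars.startswith nl w && decide (w.length < nl.length) then
        let rest := PySem.List.slice nl (some (w.length : Int)) none
        if !rest.isEmpty && (PySem.List.pyGet? rest 0).elim false PySem.Chars.isalpha then
          PySem.Set.add v (String.ofList (w ++ ' ' :: rest))
        else v
      else v
    if PySem.Chars.endswith nl w && decide (w.length < nl.length) then
      let pre := PySem.List.slice nl none (some (-(w.length : Int)))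
      if !pre.isEmpty && (PySem.List.pyGet? pre (-1)).elim false PySem.Chars.isalpha then
        PySem.Set.add v' (String.ofList (pre ++ ' ' :: w))
      else v'
    else v')
    = (pvCand nl w).foldl PySem.Set.add v := by
  unfold pvCand
  split_ifs <;> simp [List.foldl_append] <;> split_ifs <;> simp

-- A's loop 2 = folding Set.add over the concatenated candidate lists
theorem pv_loop2_eq (nl : List Char) :
    ∀ (ws : List (List Char)) (v : PySem.Set String),
    (ws.foldl (fun v word =>
      let v :=
        if PySem.Chars.startswith nl word && decide (word.length < nl.length) then
          let rest := PySem.List.slice nl (some (word.length : Int)) none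
          if !rest.isEmpty && (PySem.List.pyGet? rest 0).elim false PySem.Chars.isalpha then
            PySem.Set.add v (String.ofList (word ++ ' ' :: rest))
          else v
        else v
      if PySem.Chars.endswith nl word && decide (word.length < nl.length) then
        let pre := PySem.List.slice nl none (some (-(word.length : Int)))
        if !pre.isEmpty && (PySem.List.pyGet? pre (-1)).elim false PySem.Chars.isalpha then
          PySem.Set.add v (String.ofList (pre ++ ' ' :: word))
        else v
      else v) v)
    = (ws.flatMap (pvCand nl)).foldl PySem.Set.add v := by
  intro ws
  induction ws with
  | nil => intro v; rfl
  | cons w t ih =>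
    intro v
    rw [List.foldl_cons, List.flatMap_cons, List.foldl_append, ← pv_step_eq nl w v]
    exact ih _

-- ===== VERDICT (by name: the statement is the Claim_ definition above) =====
theorem generate_word_boundary_splits_py_spec : Claim_equal_generate_word_boundary_splits_py := by
  intro name _
  unfold Spec_generate_word_boundary_splits_py
  unfold generate_word_boundary_splits_py generate_word_boundary_splits_py_alt
  simp only []
  rw [pvA1_eq, pv_loop2_eq, pv_ofList_append, pv_splits_eq]
  rfl
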